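-- pv_equiv track=rewrite | github.com/munkhdorj-m/Python-exercise-6-2-Loop-3 | assignment.py | contains_five
-- ===== SOURCE A (Python) =====
-- def contains_five(num):
--     num = abs(num)
--
--     # Special case: num = 0
--     if num == 0:
--         return False
--
--     while num > 0:
--         digit = num % 10
--         if digit == 5:
--             return True
--         num //= 10
--
--     return False
-- ===== SOURCE B (Python) =====
-- def contains_five(num):
--     return '5' in str(abs(num))
-- ===== Notes on version B (the rewrite author's own statement) =====
-- stated objective: idiomatic
-- what changed: Replaces the explicit %/// digit-extraction loop (with a special case for 0) with a one-line substring test '5' in str(abs(num)) over the decimal representation.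
import Mathlib
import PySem

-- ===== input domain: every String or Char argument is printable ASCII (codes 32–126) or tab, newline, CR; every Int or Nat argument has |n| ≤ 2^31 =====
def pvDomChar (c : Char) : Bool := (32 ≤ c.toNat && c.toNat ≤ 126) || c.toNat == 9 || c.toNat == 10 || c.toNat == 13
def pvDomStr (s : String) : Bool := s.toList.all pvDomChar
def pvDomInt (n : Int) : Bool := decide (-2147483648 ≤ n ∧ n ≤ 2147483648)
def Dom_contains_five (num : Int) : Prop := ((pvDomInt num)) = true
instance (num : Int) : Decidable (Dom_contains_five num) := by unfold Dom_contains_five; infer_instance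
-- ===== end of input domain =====

-- B replaces A's digit-extraction loop with a substring test on the decimal string (idiomatic, same cost).


-- ===== PORT A =====
-- the while-loop of A, as structural recursion on the (nonnegative) number
def contains_five_loopA (n : Nat) : Bool :=
  if h : 0 < n then
    if n % 10 = 5 then true else contains_five_loopA (n / 10)
  else false
decreasing_by exact Nat.div_lt_self h (by norm_num)

def contains_five (num : Int) : Bool :=
  let n := num.natAbs        -- num = abs(num)
  if n = 0 then false        -- special case
  else contains_five_loopA n -- the while loop

-- ===== PORT B =====
def contains_five_alt (num : Int) : Bool :=
  PySem.Str.isIn "5" (PySem.Int.toStr |num|)   -- '5' in str(abs(num))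

-- ===== PRECONDITION & SPEC =====
def Spec_contains_five (num : Int) (out : Bool) : Prop := out = contains_five_alt num
instance (num : Int) (out : Bool) : Decidable (Spec_contains_five num out) := by unfold Spec_contains_five; infer_instance

-- ===== CLAIM (what is proved, stated in full; the proofs are below) =====
def Claim_equal_contains_five : Prop := ∀ (num : Int), Dom_contains_five num → Spec_contains_five num (contains_five num)

-- ===== LEMMAS AND PROOFS =====

theorem digitChar_eq_five_iff (d : Nat) (hd : d < 10) : d.digitChar = '5' ↔ d = 5 := by
  interval_cases d <;> simp [Nat.digitChar]

theorem singleton_infix_iff {α : Type} (a : α) (l : List α) : [a] <:+: l ↔ a ∈ l := by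
  constructor
  · intro h
    exact List.singleton_sublist.mp h.sublist
  · intro h
    obtain ⟨s, t, rfl⟩ := List.append_of_mem h
    exact ⟨s, t, by simp⟩

theorem mem_toDigits_iff_loopA (n : Nat) : ('5' ∈ Nat.toDigits 10 n) ↔ contains_five_loopA n = true := by
  induction n using Nat.strong_induction_on with
  | _ n ih =>
    rcases Nat.eq_zero_or_pos n with rfl | hpos
    · simp [Nat.toDigits_zero, contains_five_loopA]
    · rw [Nat.toDigits_eq_if (by norm_num), contains_five_loopA]
      simp only [hpos, dif_pos]
      by_cases hlt : n < 10
      · have h1 : n % 10 = n := Nat.mod_eq_of_lt hlt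
        have h2 : n / 10 = 0 := Nat.div_eq_of_lt hlt
        simp only [if_pos hlt, h1, h2, List.mem_singleton]
        rw [eq_comm, digitChar_eq_five_iff n hlt]
        constructor
        · intro h; simp [h]
        · intro h
          rcases Nat.decEq n 5 with h5 | h5
          · simp [h5, contains_five_loopA] at h
          · exact h5
      · have hrec := ih (n / 10) (Nat.div_lt_self hpos (by norm_num))
        simp only [if_neg hlt, List.mem_append, List.mem_singleton]
        rw [eq_comm, digitChar_eq_five_iff (n % 10) (Nat.mod_lt _ (by norm_num)), hrec]
        by_cases h5 : n % 10 = 5 <;> simp [h5]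

theorem alt_eq_mem (num : Int) :
    contains_five_alt num = decide ('5' ∈ Nat.toDigits 10 num.natAbs) := by
  have habs : ¬ (|num| < 0) := not_lt.mpr (abs_nonneg num)
  have htoNat : (|num|).toNat = num.natAbs := by
    rw [Int.abs_eq_natAbs]; exact Int.toNat_natCast _
  rw [contains_five_alt]
  rw [show PySem.Str.isIn "5" (PySem.Int.toStr |num|)
      = PySem.Chars.isIn "5".toList (PySem.Int.toStr |num|).toList from rfl]
  rw [PySem.Int.toList_toStr, PySem.Int.toChars, if_neg habs, htoNat]
  by_cases h : '5' ∈ Nat.toDigits 10 num.natAbs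
  · simp only [h, decide_true]
    exact (PySem.Chars.isIn_iff_infix _ _).mpr ((singleton_infix_iff '5' _).mpr h)
  · simp only [h, decide_false]
    exact (PySem.Chars.isIn_eq_false_iff _ _).mpr (fun hc => h ((singleton_infix_iff '5' _).mp hc))

-- ===== VERDICT (by name: the statement is the Claim_ definition above) =====
theorem contains_five_spec : Claim_equal_contains_five := by
  intro num _
  unfold Spec_contains_five contains_five
  rw [alt_eq_mem]
  rcases Nat.eq_zero_or_pos num.natAbs with h0 | hpos
  · simp [h0, Nat.toDigits_zero]
  · rw [if_neg (Nat.pos_iff_ne_zero.mp hpos)]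
    by_cases h : '5' ∈ Nat.toDigits 10 num.natAbs
    · simp [h, (mem_toDigits_iff_loopA num.natAbs).mp h]
    · simp only [h, decide_false]
      exact Bool.eq_false_iff.mpr (fun hc => h ((mem_toDigits_iff_loopA _).mpr hc))
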